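-- pv_equiv track=rewrite | github.com/rubelw/OSSS | src/OSSS/ai/agents/query_data/handlers/meal_accounts_handler.py | _select_meal_accounts_fields
-- ===== SOURCE A (Python) =====
-- from typing import Any, Dict, List, Sequence
--
-- def _select_meal_accounts_fields(
--     rows: Sequence[Dict[str, Any]],
-- ) -> List[str]:
--     if not rows:
--         return []
--
--     preferred_order = [
--         "id",
--         "account_code",
--         "meal_account_code",
--         "student_id",
--         "student_code",
--         "student_name",
--         "household_id",
--         "household_code",
--         "balance",
--         "status",
--         "last_transaction_at",
--         "created_at",
--         "updated_at",
--     ]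
--
--     all_keys: List[str] = []
--     for r in rows:
--         for k in r:
--             if k not in all_keys:
--                 all_keys.append(k)
--
--     ordered = [k for k in preferred_order if k in all_keys]
--     ordered.extend(k for k in all_keys if k not in ordered)
--     return ordered
-- ===== SOURCE B (Python) =====
-- from typing import Any, Dict, List, Sequence
--
-- _PREFERRED = [
--     "id",
--     "account_code",
--     "meal_account_code",
--     "student_id",
--     "student_code",
--     "student_name",
--     "household_id",
--     "household_code",
--     "balance",
--     "status",
--     "last_transaction_at",
--     "created_at",
--     "updated_at",
-- ]
-- _PREF_INDEX = {k: i for i, k in enumerate(_PREFERRED)}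
--
--
-- def _select_meal_accounts_fields(rows: Sequence[Dict[str, Any]]) -> List[str]:
--     if not rows:
--         return []
--     # Index table + sort: record the position of the first occurrence of each
--     # key, then sort the distinct keys by a single integer rank — preferred
--     # keys rank by their position in the preferred list (all < P), every other
--     # key ranks strictly after by P + its first-seen position.
--     P = len(_PREFERRED)
--     first_seen: Dict[str, int] = {}
--     n = 0
--     for r in rows:
--         for k in r:
--             if k not in first_seen:
--                 first_seen[k] = n
--             n += 1
--     return sorted(
--         first_seen,
--         key=lambda k: _PREF_INDEX[k] if k in _PREF_INDEX else P + first_seen[k],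
--     )
-- ===== Notes on version B (the rewrite author's own statement) =====
-- stated objective: faster
-- what changed: Replaces A's membership-scanned key list plus two staged filter passes by an index-table-and-sort strategy: one pass records each key's first-seen position in a dict, then the distinct keys are sorted under a single integer rank (preferred position for preferred keys, list-length + first-seen position for the rest).
import Mathlib
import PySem

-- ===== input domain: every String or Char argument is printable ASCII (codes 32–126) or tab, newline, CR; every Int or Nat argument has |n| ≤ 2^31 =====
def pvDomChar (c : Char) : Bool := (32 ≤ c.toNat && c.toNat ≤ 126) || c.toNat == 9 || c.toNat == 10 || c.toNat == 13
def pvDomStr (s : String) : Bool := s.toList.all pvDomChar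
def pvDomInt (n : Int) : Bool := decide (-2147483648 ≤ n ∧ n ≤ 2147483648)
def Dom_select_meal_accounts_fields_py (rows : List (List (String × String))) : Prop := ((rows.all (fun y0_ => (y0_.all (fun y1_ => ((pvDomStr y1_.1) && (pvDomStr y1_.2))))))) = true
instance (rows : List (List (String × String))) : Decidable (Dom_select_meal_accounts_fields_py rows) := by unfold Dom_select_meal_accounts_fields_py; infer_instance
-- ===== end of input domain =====

-- B replaces A's list-scan key collection and two filter passes by a first-seen
-- index table plus a sort of the distinct keys under a single integer rank;
-- objective: faster (no repeated list-membership scans).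


-- ===== PORT A =====
-- the preferred_order literal (shared data constant of both Pythons)
def pvPreferred : List String :=
  ["id", "account_code", "meal_account_code", "student_id", "student_code",
   "student_name", "household_id", "household_code", "balance", "status",
   "last_transaction_at", "created_at", "updated_at"]

def select_meal_accounts_fields_py (rows : List (List (String × String))) : List String :=
  if rows = [] then []
  else
    -- all_keys: for r in rows: for k in r: if k not in all_keys: all_keys.append(k)
    let all_keys := rows.foldl
      (fun acc r => r.foldl (fun acc kv => if kv.1 ∈ acc then acc else acc ++ [kv.1]) acc) []
    -- ordered = [k for k in preferred_order if k in all_keys]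
    let ordered := pvPreferred.filter (fun k => decide (k ∈ all_keys))
    -- ordered.extend(k for k in all_keys if k not in ordered)  (lazy: checks the growing list)
    all_keys.foldl (fun o k => if k ∈ o then o else o ++ [k]) ordered

-- ===== PORT B =====
-- _PREF_INDEX = {k: i for i, k in enumerate(_PREFERRED)}
def pvPrefIndex : PySem.Dict String Int :=
  (PySem.List.enumerate pvPreferred 0).foldl (fun d p => d.insert p.2 p.1) PySem.Dict.empty

def select_meal_accounts_fields_py_alt (rows : List (List (String × String))) : List String :=
  if rows = [] then []
  else
    let P : Int := (pvPreferred.length : Int)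
    -- first_seen index table: for r in rows: for k in r: if k not in first_seen: first_seen[k] = n; n += 1
    let st := rows.foldl
      (fun (st : PySem.Dict String Int × Int) r =>
        r.foldl (fun st kv =>
          ((if st.1.contains kv.1 then st.1 else st.1.insert kv.1 st.2), st.2 + 1)) st)
      (PySem.Dict.empty, 0)
    -- sorted(first_seen, key=lambda k: PREF_INDEX[k] if k in PREF_INDEX else P + first_seen[k])
    PySem.List.sorted st.1.keys
      (fun k => if pvPrefIndex.contains k then pvPrefIndex.getD k 0 else P + st.1.getD k 0) false

-- ===== PRECONDITION & SPEC =====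
def Spec_select_meal_accounts_fields_py (rows : List (List (String × String))) (out : List String) : Prop := out = select_meal_accounts_fields_py_alt rows
instance (rows : List (List (String × String))) (out : List String) : Decidable (Spec_select_meal_accounts_fields_py rows out) := by unfold Spec_select_meal_accounts_fields_py; infer_instance

-- ===== CLAIM (what is proved, stated in full; the proofs are below) =====
def Claim_equal_select_meal_accounts_fields_py : Prop := ∀ (rows : List (List (String × String))), Dom_select_meal_accounts_fields_py rows → Spec_select_meal_accounts_fields_py rows (select_meal_accounts_fields_py rows)

-- ===== LEMMAS AND PROOFS =====

-- A's inner step (collect first-seen keys into a list)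
def pvStepA (acc : List String) (kv : String × String) : List String :=
  if kv.1 ∈ acc then acc else acc ++ [kv.1]

-- B's inner step (first-seen index dict plus running position counter)
def pvStepB (st : PySem.Dict String Int × Int) (kv : String × String) :
    PySem.Dict String Int × Int :=
  ((if st.1.contains kv.1 then st.1 else st.1.insert kv.1 st.2), st.2 + 1)

-- invariant tying B's dict to A's key list: same keys (so Nodup), values are
-- nonnegative, below the counter, and strictly increasing in insertion order
def pvInv (acc : List String) (st : PySem.Dict String Int × Int) : Prop :=
  st.1.keys = acc ∧ acc.Nodup ∧ 0 ≤ st.2 ∧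
  (∀ v ∈ st.1.values, 0 ≤ v ∧ v < st.2) ∧ st.1.values.Pairwise (· < ·)

theorem pvInv_step (acc : List String) (st : PySem.Dict String Int × Int)
    (kv : String × String) (h : pvInv acc st) :
    pvInv (pvStepA acc kv) (pvStepB st kv) := by
  obtain ⟨hk, hnd, hn, hv, hp⟩ := h
  unfold pvStepA pvStepB
  have hc : st.1.contains kv.1 = decide (kv.1 ∈ acc) := by
    rw [PySem.Dict.contains_eq_decide_mem_keys, hk]
  by_cases hm : kv.1 ∈ acc
  · simp only [hm, if_true, hc, decide_true, if_true]
    exact ⟨hk, hnd, by omega, fun v hv' => by have := hv v hv'; omega, hp⟩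
  · simp only [hm, if_false, hc, decide_false, Bool.false_eq_true, if_false]
    have hcf : st.1.contains kv.1 = false := by rw [hc]; simp [hm]
    have hitems := PySem.Dict.items_insert_of_not_contains (d := st.1) (k := kv.1)
      (v := st.2) hcf
    have hkeys : (st.1.insert kv.1 st.2).keys = st.1.keys ++ [kv.1] := by
      show (st.1.insert kv.1 st.2).items.map (·.1) = _
      rw [hitems]; simp [PySem.Dict.keys]
    have hvals : (st.1.insert kv.1 st.2).values = st.1.values ++ [st.2] := by
      show (st.1.insert kv.1 st.2).items.map (·.2) = _
      rw [hitems]; simp [PySem.Dict.values]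
    refine ⟨by rw [hkeys, hk], ?_, by omega, ?_, ?_⟩
    · simp [List.nodup_append, hnd]
      exact fun a ha he => hm (he ▸ ha)
    · intro v hv'
      rw [hvals] at hv'
      rcases List.mem_append.mp hv' with h' | h'
      · have := hv v h'; omega
      · simp at h'; omega
    · rw [hvals]
      rw [List.pairwise_append]
      refine ⟨hp, by simp, ?_⟩
      intro a ha b hb
      simp at hb
      subst hb
      exact (hv a ha).2

theorem pvInv_foldl_inner (r : List (String × String)) :
    ∀ (acc : List String) (st : PySem.Dict String Int × Int), pvInv acc st →
      pvInv (r.foldl pvStepA acc) (r.foldl pvStepB st) := by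
  induction r with
  | nil => intro acc st h; simpa using h
  | cons kv t ih => intro acc st h; exact ih _ _ (pvInv_step acc st kv h)

theorem pvInv_foldl_outer (rows : List (List (String × String))) :
    ∀ (acc : List String) (st : PySem.Dict String Int × Int), pvInv acc st →
      pvInv (rows.foldl (fun a r => r.foldl pvStepA a) acc)
            (rows.foldl (fun s r => r.foldl pvStepB s) st) := by
  induction rows with
  | nil => intro acc st h; simpa using h
  | cons r t ih => intro acc st h; exact ih _ _ (pvInv_foldl_inner r acc st h)

-- A's extend loop over a duplicate-free list appends exactly the new elements
theorem pvExtend_foldl (l : List String) :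
    ∀ o : List String, l.Nodup →
      l.foldl (fun o k => if k ∈ o then o else o ++ [k]) o
        = o ++ l.filter (fun k => !(decide (k ∈ o))) := by
  induction l with
  | nil => intro o _; simp
  | cons k t ih =>
      intro o hnd
      have hkt : k ∉ t := (List.nodup_cons.mp hnd).1
      have htn : t.Nodup := (List.nodup_cons.mp hnd).2
      by_cases hm : k ∈ o
      · simp only [List.foldl_cons, hm, if_true]
        rw [ih o htn]; simp [hm]
      · simp only [List.foldl_cons, hm, if_false]
        rw [ih (o ++ [k]) htn]
        have hf : t.filter (fun x => !(decide (x ∈ o ++ [k])))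
            = t.filter (fun x => !(decide (x ∈ o))) := by
          apply List.filter_congr
          intro x hx
          have hxk : x ≠ k := fun he => hkt (he ▸ hx)
          simp [List.mem_append, hxk]
        rw [hf]; simp [hm]

-- facts about the concrete preferred-index dict
theorem pvPrefIndex_keys : pvPrefIndex.keys = pvPreferred := by decide
theorem pvPrefIndex_contains (k : String) :
    pvPrefIndex.contains k = decide (k ∈ pvPreferred) := by
  rw [PySem.Dict.contains_eq_decide_mem_keys, pvPrefIndex_keys]
theorem pvPrefIndex_lt (k : String) (h : k ∈ pvPreferred) :
    pvPrefIndex.getD k 0 < 13 := by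
  have : pvPreferred.all (fun a => decide (pvPrefIndex.getD a 0 < 13)) = true := by decide
  have := List.all_eq_true.mp this k h
  simpa using this
theorem pvPrefIndex_pairwise :
    pvPreferred.Pairwise (fun a b => pvPrefIndex.getD a 0 < pvPrefIndex.getD b 0) := by decide

-- ===== VERDICT (by name: the statement is the Claim_ definition above) =====
theorem select_meal_accounts_fields_py_spec : Claim_equal_select_meal_accounts_fields_py := by
  intro rows _
  unfold Spec_select_meal_accounts_fields_py select_meal_accounts_fields_py
    select_meal_accounts_fields_py_alt
  by_cases hr : rows = []
  · simp [hr]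
  · simp only [hr, if_false]
    have hinv := pvInv_foldl_outer rows [] (PySem.Dict.empty, 0)
      ⟨rfl, List.nodup_nil, le_refl 0, by simp [PySem.Dict.values, PySem.Dict.empty], by simp [PySem.Dict.values, PySem.Dict.empty]⟩
    set K := rows.foldl (fun a r => r.foldl pvStepA a) [] with hK
    set st := rows.foldl (fun s r => r.foldl pvStepB s) (PySem.Dict.empty, 0) with hst
    obtain ⟨hkeys, hnd, _, hbnd, hpw⟩ := hinv
    -- A's side: ordered ++ the non-preferred keys of K in first-seen order
    have hvals : st.1.values = st.1.keys.map (fun k => st.1.getD k 0) :=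
      PySem.Dict.values_eq_map_keys st.1 (hkeys ▸ hnd) 0
    have hA : K.foldl (fun o k => if k ∈ o then o else o ++ [k])
          (pvPreferred.filter (fun k => decide (k ∈ K)))
        = pvPreferred.filter (fun k => decide (k ∈ K))
          ++ K.filter (fun k => !(decide (k ∈ pvPreferred))) := by
      rw [pvExtend_foldl K _ hnd]
      congr 1
      apply List.filter_congr
      intro x hx
      simp [List.mem_filter, hx]
    show K.foldl (fun o k => if k ∈ o then o else o ++ [k])
        (pvPreferred.filter (fun k => decide (k ∈ K)))
      = PySem.List.sorted st.1.keys
          (fun k => if pvPrefIndex.contains k then pvPrefIndex.getD k 0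
                    else (pvPreferred.length : Int) + st.1.getD k 0) false
    rw [hA, hkeys]
    -- B's side: name the A-side list as sorted
    apply Eq.symm
    apply PySem.List.sorted_eq_of_perm_of_pairwise_lt
    · -- permutation with K
      have h1 : List.Perm (pvPreferred.filter (fun k => decide (k ∈ K)))
          (K.filter (fun k => decide (k ∈ pvPreferred))) := by
        apply (List.perm_ext_iff_of_nodup (List.Nodup.filter _ (by decide))
          (List.Nodup.filter _ hnd)).mpr
        intro a
        simp [List.mem_filter, and_comm]
      exact (h1.append_right _).trans
        (List.filter_append_perm (fun k => decide (k ∈ pvPreferred)) K)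
    · -- strictly increasing under the rank key
      rw [List.pairwise_append]
      have hkeyPref : ∀ a ∈ pvPreferred,
          (if pvPrefIndex.contains a then pvPrefIndex.getD a 0
           else (pvPreferred.length : Int) + st.1.getD a 0) = pvPrefIndex.getD a 0 := by
        intro a ha; simp [pvPrefIndex_contains, ha]
      have hkeyExtra : ∀ b, b ∉ pvPreferred →
          (if pvPrefIndex.contains b then pvPrefIndex.getD b 0
           else (pvPreferred.length : Int) + st.1.getD b 0)
          = (pvPreferred.length : Int) + st.1.getD b 0 := by
        intro b hb; simp [pvPrefIndex_contains, hb]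
      have hgetpw : K.Pairwise (fun a b => st.1.getD a 0 < st.1.getD b 0) := by
        apply List.pairwise_map.mp
        rw [← hkeys] at hK ⊢
        rw [← hvals]
        exact hpw
      have hget0 : ∀ b ∈ K, 0 ≤ st.1.getD b 0 := by
        intro b hb
        refine (hbnd _ ?_).1
        rw [hvals, hkeys]
        exact List.mem_map.mpr ⟨b, hb, rfl⟩
      refine ⟨?_, ?_, ?_⟩
      · -- within the preferred block
        apply List.Pairwise.imp_of_mem (R := fun a b => pvPrefIndex.getD a 0 < pvPrefIndex.getD b 0)
        · intro a b ha hb hlt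
          have ha' := (List.mem_filter.mp ha).1
          have hb' := (List.mem_filter.mp hb).1
          rw [hkeyPref a ha', hkeyPref b hb']
          exact hlt
        · exact List.Pairwise.filter _ pvPrefIndex_pairwise
      · -- within the extras block
        apply List.Pairwise.imp_of_mem (R := fun a b => st.1.getD a 0 < st.1.getD b 0)
        · intro a b ha hb hlt
          have ha' : a ∉ pvPreferred := by
            have := (List.mem_filter.mp ha).2; simpa using this
          have hb' : b ∉ pvPreferred := by
            have := (List.mem_filter.mp hb).2; simpa using this
          rw [hkeyExtra a ha', hkeyExtra b hb']
          omega
        · exact List.Pairwise.sublist List.filter_sublist hgetpw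
      · -- preferred block strictly before extras
        intro a ha b hb
        have ha' := (List.mem_filter.mp ha).1
        have hbK := (List.mem_filter.mp hb).1
        have hb' : b ∉ pvPreferred := by
          have := (List.mem_filter.mp hb).2; simpa using this
        rw [hkeyPref a ha', hkeyExtra b hb']
        have h1 := pvPrefIndex_lt a ha'
        have h2 := hget0 b hbK
        have hlen : (pvPreferred.length : Int) = 13 := by decide
        omega
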